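-- pv_equiv track=rewrite | github.com/22Pickles/MidnightStrategyAnalysis | int/strategies.py | str5
-- ===== SOURCE A (Python) =====
-- from typing import List
--
-- def str5(roll: List[int], pocket: List[int]) -> List[int]:
--     s: List[int] = []
--     if 1 not in pocket:
--         for i in range(len(roll)):
--             if roll[i] == 1:
--                 s.append(roll[i])
--                 break
--     if 4 not in pocket:
--         for i in range(len(roll)):
--             if roll[i] == 4:
--                 s.append(roll[i])
--                 break
--     for i in range(len(roll)):
--         if roll[i] == 6:
--             if len(roll) - len(s) < 6 and ((1 not in pocket) or (4 not in pocket)):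
--                 break
--             else:
--                 s.append(roll[i])
--     if len(s) == 0:
--         s.append(max(roll))
--     return s
-- ===== SOURCE B (Python) =====
-- from typing import List
--
-- def str5(roll: List[int], pocket: List[int]) -> List[int]:
--     # one-pass histogram; everything else is read off the counts
--     hist = {}
--     for x in roll:
--         hist[x] = hist.get(x, 0) + 1
--     want1 = 1 not in pocket and hist.get(1, 0) > 0
--     want4 = 4 not in pocket and hist.get(4, 0) > 0
--     sixes = hist.get(6, 0)
--     if 1 not in pocket or 4 not in pocket:
--         sixes = max(0, min(sixes, len(roll) - 5 - want1 - want4))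
--     s = [1] * want1 + [4] * want4 + [6] * sixes
--     return s or [max(roll)]
-- ===== Notes on version B (the rewrite author's own statement) =====
-- stated objective: alternative
-- what changed: B builds a face histogram in one dictionary pass and reads the whole answer off the counts (boolean arithmetic [1]*want1+[4]*want4+[6]*sixes with a clamped sixes count), instead of A's three scans over roll with breaks and a growing-length stop condition.
import Mathlib
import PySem

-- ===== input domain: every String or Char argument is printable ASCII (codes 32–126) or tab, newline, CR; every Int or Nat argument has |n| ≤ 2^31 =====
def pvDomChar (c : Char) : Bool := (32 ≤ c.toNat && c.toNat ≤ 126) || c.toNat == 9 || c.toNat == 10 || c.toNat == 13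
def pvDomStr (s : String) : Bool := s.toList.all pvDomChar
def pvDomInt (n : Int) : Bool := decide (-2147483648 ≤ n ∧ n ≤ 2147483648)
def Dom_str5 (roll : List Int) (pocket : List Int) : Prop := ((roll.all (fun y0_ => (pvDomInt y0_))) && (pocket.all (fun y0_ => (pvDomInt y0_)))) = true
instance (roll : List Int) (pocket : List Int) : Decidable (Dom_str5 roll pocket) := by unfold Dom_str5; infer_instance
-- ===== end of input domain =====

-- B builds a face histogram in one dict pass and reads the answer off the counts
-- (clamped sixes count, boolean arithmetic), instead of A's three scans with breaks.

-- ===== PORT A =====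
-- 'for i in range(len(roll)): if roll[i] == t: s.append(roll[i]); break' — the appended prefix
def str5FindEq : List Int → Int → List Int
  | [], _ => []
  | x :: xs, t => if x = t then [x] else str5FindEq xs t

-- the third loop: for each element, on a 6 either break or append it
def str5Loop6 (n : Int) (want : Bool) : List Int → List Int → List Int
  | [], s => s
  | x :: xs, s =>
    if x = 6 then
      if n - (s.length : Int) < 6 ∧ want = true then s
      else str5Loop6 n want xs (s ++ [x])
    else str5Loop6 n want xs s

def str5 (roll : List Int) (pocket : List Int) : List Int :=
  let s0 : List Int := []
  let s1 := if (1 : Int) ∈ pocket then s0 else s0 ++ str5FindEq roll 1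
  let s2 := if (4 : Int) ∈ pocket then s1 else s1 ++ str5FindEq roll 4
  let want := decide ((1 : Int) ∉ pocket) || decide ((4 : Int) ∉ pocket)
  let s3 := str5Loop6 (roll.length : Int) want roll s2
  if s3.length = 0 then
    -- max(roll); none = ValueError, excluded by Pre_str5
    s3 ++ (match PySem.List.max? roll (fun y => y) with | some m => [m] | none => [])
  else s3

-- ===== PORT B =====
def str5_alt (roll : List Int) (pocket : List Int) : List Int :=
  -- hist[x] = hist.get(x, 0) + 1 over roll
  let hist := roll.foldl (fun d x => d.insert x (d.getD x 0 + 1)) (PySem.Dict.empty : PySem.Dict Int Int)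
  let want1 := !(decide ((1 : Int) ∈ pocket)) && decide (hist.getD 1 0 > 0)
  let want4 := !(decide ((4 : Int) ∈ pocket)) && decide (hist.getD 4 0 > 0)
  let sixes0 : Int := hist.getD 6 0
  let sixes : Int :=
    if ((1 : Int) ∉ pocket) ∨ ((4 : Int) ∉ pocket) then
      max 0 (min sixes0 ((roll.length : Int) - 5 - (if want1 then 1 else 0) - (if want4 then 1 else 0)))
    else sixes0
  let s := (if want1 then [(1 : Int)] else []) ++ (if want4 then [(4 : Int)] else [])
            ++ List.replicate sixes.toNat 6
  if s = [] then
    (match PySem.List.max? roll (fun y => y) with | some mx => [mx] | none => [])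
  else s

-- ===== PRECONDITION & SPEC =====
-- Pre_ excludes only roll = [], where Python A raises ValueError at max(roll) (B raises there too).
def Pre_str5 (roll : List Int) (pocket : List Int) : Prop := roll ≠ []
instance (roll : List Int) (pocket : List Int) : Decidable (Pre_str5 roll pocket) := by unfold Pre_str5; infer_instance
def pvWitness_str5 : List Int × List Int := ([2, 6], [3])

def Spec_str5 (roll : List Int) (pocket : List Int) (out : List Int) : Prop := out = str5_alt roll pocket
instance (roll : List Int) (pocket : List Int) (out : List Int) : Decidable (Spec_str5 roll pocket out) := by unfold Spec_str5; infer_instance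

-- ===== CLAIM (what is proved, stated in full; the proofs are below) =====
def Claim_equal_str5 : Prop := ∀ (roll : List Int) (pocket : List Int), Dom_str5 roll pocket → Pre_str5 roll pocket → Spec_str5 roll pocket (str5 roll pocket)

-- ===== LEMMAS AND PROOFS =====

theorem str5FindEq_eq (roll : List Int) (t : Int) :
    str5FindEq roll t = if t ∈ roll then [t] else [] := by
  induction roll with
  | nil => simp [str5FindEq]
  | cons x xs ih =>
    by_cases h : x = t
    · subst h; simp [str5FindEq]
    · have h' : ¬ t = x := fun e => h e.symm
      simp [str5FindEq, h, ih, h']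

theorem str5Loop6_false (n : Int) (xs : List Int) : ∀ s : List Int,
    str5Loop6 n false xs s = s ++ List.replicate (xs.count 6) 6 := by
  induction xs with
  | nil => intro s; simp [str5Loop6]
  | cons x xs ih =>
    intro s
    by_cases h : x = 6
    · subst h
      rw [str5Loop6, if_pos rfl, if_neg (by simp), ih, List.count_cons_self,
        List.replicate_succ, List.append_assoc]
      rfl
    · rw [str5Loop6, if_neg h, ih, List.count_cons_of_ne h]

theorem str5Loop6_true (n : Int) (xs : List Int) : ∀ s : List Int,
    str5Loop6 n true xs s =
      s ++ List.replicate (min (xs.count 6) (n - 5 - (s.length : Int)).toNat) 6 := by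
  induction xs with
  | nil => intro s; simp [str5Loop6]
  | cons x xs ih =>
    intro s
    by_cases h : x = 6
    · subst h
      by_cases hb : n - (s.length : Int) < 6
      · have h0 : (n - 5 - (s.length : Int)).toNat = 0 := by omega
        rw [str5Loop6, if_pos rfl, if_pos ⟨hb, rfl⟩, h0]
        simp
      · rw [str5Loop6, if_pos rfl, if_neg (by simp [hb]), ih]
        have hL : (((s ++ [6]).length : Nat) : Int) = (s.length : Int) + 1 := by
          simp
        rw [hL, List.count_cons_self,
          show min (xs.count 6 + 1) (n - 5 - (s.length : Int)).toNat
              = min (xs.count 6) (n - 5 - ((s.length : Int) + 1)).toNat + 1 from by omega,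
          List.replicate_succ, List.append_assoc]
        rfl
    · rw [str5Loop6, if_neg h, ih, List.count_cons_of_ne h]

-- B's histogram lookups are counts
theorem str5_hist_getD (roll : List Int) (v : Int) :
    ((roll.foldl (fun d x => d.insert x (d.getD x 0 + 1)) (PySem.Dict.empty : PySem.Dict Int Int)).getD v 0)
      = (roll.count v : Int) := by
  rw [PySem.Dict.getD_foldl_insert_add_one, PySem.Dict.getD_empty]
  ring

theorem str5_count_key (c : Nat) (n L : Int) :
    (max 0 (min ((c : Nat) : Int) (n - 5 - L))).toNat
      = min c (n - 5 - L).toNat := by omega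

theorem str5_spec' (roll pocket : List Int) :
    str5 roll pocket = str5_alt roll pocket := by
  by_cases h1 : (1 : Int) ∈ pocket <;> by_cases h4 : (4 : Int) ∈ pocket
  · -- 1 ∈ pocket, 4 ∈ pocket: keep every six
    unfold str5 str5_alt
    simp [h1, h4, str5_hist_getD, str5Loop6_false]
    split_ifs with h <;> simp [h]
  · -- 1 ∈ pocket, 4 ∉ pocket
    unfold str5 str5_alt
    have h4r : ((4 : Int) ∈ roll ↔ 0 < roll.count 4) := List.count_pos_iff.symm
    simp [h1, h4, str5_hist_getD, str5FindEq_eq, str5Loop6_true, str5_count_key, ← h4r]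
    by_cases hm : (4 : Int) ∈ roll
    · simp [hm]
    · simp [hm]
      by_cases hc : List.count 6 roll = 0
      · simp [hc]
      · by_cases hn : roll.length ≤ 5
        · have h0 : ((roll.length : Int) - 5).toNat = 0 := by omega
          simp [hc, hn, h0]
        · simp [hc, hn]
          try omega
  · -- 1 ∉ pocket, 4 ∈ pocket
    unfold str5 str5_alt
    have h1r : ((1 : Int) ∈ roll ↔ 0 < roll.count 1) := List.count_pos_iff.symm
    simp [h1, h4, str5_hist_getD, str5FindEq_eq, str5Loop6_true, str5_count_key, ← h1r]
    by_cases hm : (1 : Int) ∈ roll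
    · simp [hm]
    · simp [hm]
      by_cases hc : List.count 6 roll = 0
      · simp [hc]
      · by_cases hn : roll.length ≤ 5
        · have h0 : ((roll.length : Int) - 5).toNat = 0 := by omega
          simp [hc, hn, h0]
        · simp [hc, hn]
          try omega
  · -- 1 ∉ pocket, 4 ∉ pocket
    unfold str5 str5_alt
    have h1r : ((1 : Int) ∈ roll ↔ 0 < roll.count 1) := List.count_pos_iff.symm
    have h4r : ((4 : Int) ∈ roll ↔ 0 < roll.count 4) := List.count_pos_iff.symm
    simp [h1, h4, str5_hist_getD, str5FindEq_eq, str5Loop6_true, ← h1r, ← h4r]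
    by_cases hm1 : (1 : Int) ∈ roll <;> by_cases hm4 : (4 : Int) ∈ roll
    · simp [hm1, hm4]
      omega
    · simp [hm1, hm4]
      omega
    · simp [hm1, hm4]
      omega
    · simp [hm1, hm4]
      by_cases hc : List.count 6 roll = 0
      · simp [hc]
      · by_cases hn : roll.length ≤ 5
        · have h0 : ((roll.length : Int) - 5).toNat = 0 := by omega
          simp [hc, hn, h0]
        · simp [hc, hn]
          try omega

-- ===== VERDICT (by name: the statement is the Claim_ definition above) =====
theorem str5_spec : Claim_equal_str5 := by
  intro roll pocket _ _
  exact str5_spec' roll pocket
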